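-- pv_equiv track=rewrite | github.com/YoTro/Geetest4_yolov8 | utils/coordinate_utils.py | sort_coordinates_by_reading_order
-- ===== SOURCE A (Python) =====
-- from typing import List, Tuple, Dict, Any, Optional
--
-- def sort_coordinates_by_reading_order(
--     coords: List[Tuple[int, int]],
--     tolerance: int = 20
-- ) -> List[Tuple[int, int]]:
--     """
--     按阅读顺序（从左到右，从上到下）排序坐标
--     """
--     if not coords:
--         return []
--
--     sorted_by_y = sorted(coords, key=lambda c: c[1])
--
--     rows = []
--     current_row = [sorted_by_y[0]]
--     current_y = sorted_by_y[0][1]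
--
--     for coord in sorted_by_y[1:]:
--         if abs(coord[1] - current_y) <= tolerance:
--             current_row.append(coord)
--         else:
--             current_row.sort(key=lambda c: c[0])
--             rows.append(current_row)
--             current_row = [coord]
--             current_y = coord[1]
--
--     if current_row:
--         current_row.sort(key=lambda c: c[0])
--         rows.append(current_row)
--
--     result = [item for row in rows for item in row]
--     return result
-- ===== SOURCE B (Python) =====
-- def sort_coordinates_by_reading_order(coords, tolerance=20):
--     # Selection of rows straight from the unsorted input: no global y-sort.
--     # Repeatedly extract the first point with minimal y as the row anchor,
--     # split the rest around the tolerance band, and emit the row in one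
--     # lexicographic (x, y) sort.
--     result = []
--     remaining = list(coords)
--     while remaining:
--         anchor = min(remaining, key=lambda p: p[1])
--         remaining.remove(anchor)
--         row = [anchor] + [p for p in remaining if p[1] - anchor[1] <= tolerance]
--         remaining = [p for p in remaining if p[1] - anchor[1] > tolerance]
--         result.extend(sorted(row, key=lambda p: (p[0], p[1])))
--     return result
-- ===== Notes on version B (the rewrite author's own statement) =====
-- stated objective: alternative
-- what changed: Replaces the global stable y-sort with run-grouping and per-row x-sorts by a selection scheme on the unsorted input: repeatedly extract the first minimal-y point as the row anchor, partition the remainder around the tolerance band, and emit each row with a single lexicographic (x, y) sort.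
import Mathlib
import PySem

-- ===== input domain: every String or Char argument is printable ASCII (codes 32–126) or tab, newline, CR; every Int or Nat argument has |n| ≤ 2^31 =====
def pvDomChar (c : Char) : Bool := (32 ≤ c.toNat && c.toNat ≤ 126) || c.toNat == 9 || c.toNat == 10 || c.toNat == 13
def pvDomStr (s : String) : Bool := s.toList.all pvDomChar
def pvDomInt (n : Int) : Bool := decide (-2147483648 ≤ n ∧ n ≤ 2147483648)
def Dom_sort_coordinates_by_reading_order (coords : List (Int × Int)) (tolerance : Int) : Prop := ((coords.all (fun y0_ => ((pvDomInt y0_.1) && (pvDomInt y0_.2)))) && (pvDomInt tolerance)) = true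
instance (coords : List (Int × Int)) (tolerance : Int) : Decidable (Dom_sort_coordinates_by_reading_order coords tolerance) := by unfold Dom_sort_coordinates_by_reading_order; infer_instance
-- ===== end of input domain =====

-- B replaces A's global stable y-sort + run-grouping + per-row x-sorts by a selection scheme:
-- repeatedly extract the first minimal-y point as the row anchor, partition the unsorted remainder
-- around the tolerance band, and emit each row with one lexicographic (x, y) sort (alternative algorithm).


-- ===== PORT A =====
def sort_coordinates_by_reading_order (coords : List (Int × Int)) (tolerance : Int) : List (Int × Int) :=
  if coords = [] then []
  else
    let sorted_by_y := PySem.List.sorted coords (fun c => c.2) false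
    match sorted_by_y with
    | [] => []   -- unreachable: sorted of a nonempty list is nonempty (guard for totality only)
    | h :: t =>
      -- state: (rows, current_row, current_y)
      let st := t.foldl
        (fun (s : List (List (Int × Int)) × List (Int × Int) × Int) coord =>
          if |coord.2 - s.2.2| ≤ tolerance then
            (s.1, s.2.1 ++ [coord], s.2.2)
          else
            (s.1 ++ [PySem.List.sorted s.2.1 (fun c => c.1) false], [coord], coord.2))
        ([], [h], h.2)
      let rows := if st.2.1 = [] then st.1
                  else st.1 ++ [PySem.List.sorted st.2.1 (fun c => c.1) false]
      rows.flatten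

-- ===== PORT B =====
-- while remaining: anchor = min(remaining, key=y); remaining.remove(anchor);
--   row = [anchor] + in-band part; remaining = out-of-band part; result += sorted(row, key=(x, y))
def pvBLoop (tolerance : Int) (remaining result : List (Int × Int)) : List (Int × Int) :=
  match hmin : PySem.List.min? remaining (fun p => p.2) with
  | none => result
  | some anchor =>
    match hrem : PySem.List.remove? remaining anchor with
    | none => result   -- unreachable: Python's list.remove never fails here (the minimum is a member)
    | some remaining' =>
      pvBLoop tolerance
        (remaining'.filter (fun p => decide (p.2 - anchor.2 > tolerance)))
        (result ++ PySem.List.sorted2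
          (anchor :: remaining'.filter (fun p => decide (p.2 - anchor.2 ≤ tolerance)))
          (fun p => p.1) (fun p => p.2) false)
termination_by remaining.length
decreasing_by
  have hmem := PySem.List.min?_mem hmin
  have he : remaining' = remaining.erase anchor := by
    rw [PySem.List.remove?_eq_some_erase remaining anchor hmem] at hrem
    exact (Option.some.inj hrem).symm
  have h1 : (remaining.erase anchor).length = remaining.length - 1 :=
    List.length_erase_of_mem hmem
  have h2 : 0 < remaining.length := List.length_pos_of_mem hmem
  calc (remaining'.filter (fun p => decide (p.2 - anchor.2 > tolerance))).length
      ≤ remaining'.length := List.length_filter_le _ _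
    _ < remaining.length := by rw [he, h1]; omega

def sort_coordinates_by_reading_order_alt (coords : List (Int × Int)) (tolerance : Int) : List (Int × Int) :=
  pvBLoop tolerance coords []

-- ===== PRECONDITION & SPEC =====
def Spec_sort_coordinates_by_reading_order (coords : List (Int × Int)) (tolerance : Int) (out : List (Int × Int)) : Prop := out = sort_coordinates_by_reading_order_alt coords tolerance
instance (coords : List (Int × Int)) (tolerance : Int) (out : List (Int × Int)) : Decidable (Spec_sort_coordinates_by_reading_order coords tolerance out) := by unfold Spec_sort_coordinates_by_reading_order; infer_instance

-- ===== CLAIM (what is proved, stated in full; the proofs are below) =====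
def Claim_equal_sort_coordinates_by_reading_order : Prop := ∀ (coords : List (Int × Int)) (tolerance : Int), Dom_sort_coordinates_by_reading_order coords tolerance → Spec_sort_coordinates_by_reading_order coords tolerance (sort_coordinates_by_reading_order coords tolerance)

-- ===== LEMMAS AND PROOFS =====

-- comparators: by y, by x, and lexicographically by (x, y)
def pvLtY : Int × Int → Int × Int → Bool := fun a b => decide (a.2 < b.2)
def pvLtX : Int × Int → Int × Int → Bool := fun a b => decide (a.1 < b.1)
def pvLtLex : Int × Int → Int × Int → Bool :=
  fun a b => decide ((toLex a : Lex (Int × Int)) < toLex b)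

-- raw row groups of the y-sorted tail t, given the open row cur anchored at cy (A's loop state)
def pvGroups (tol : Int) : List (Int × Int) → List (Int × Int) → Int → List (List (Int × Int))
  | [], cur, _ => [cur]
  | c :: t, cur, cy =>
    if |c.2 - cy| ≤ tol then pvGroups tol t (cur ++ [c]) cy
    else cur :: pvGroups tol t [c] c.2

-- the rows of a y-sorted list, by structural recursion (bridge between the two ports)
def pvRows (tol : Int) : List (Int × Int) → List (List (Int × Int))
  | [] => []
  | h :: t =>
    (h :: t.takeWhile (fun c => decide (|c.2 - h.2| ≤ tol))) ::
      pvRows tol (t.dropWhile (fun c => decide (|c.2 - h.2| ≤ tol)))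
termination_by l => l.length
decreasing_by
  exact Nat.lt_succ_of_le (List.length_dropWhile_le _ t)

-- A's loop computes the x-sorted groups
theorem pvA_loop (tol : Int) (t : List (Int × Int)) :
    ∀ (rows : List (List (Int × Int))) (cur : List (Int × Int)) (cy : Int), cur ≠ [] →
    (if (t.foldl
        (fun (s : List (List (Int × Int)) × List (Int × Int) × Int) coord =>
          if |coord.2 - s.2.2| ≤ tol then
            (s.1, s.2.1 ++ [coord], s.2.2)
          else
            (s.1 ++ [PySem.List.sorted s.2.1 (fun c => c.1) false], [coord], coord.2))
        (rows, cur, cy)).2.1 = []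
     then (t.foldl
        (fun (s : List (List (Int × Int)) × List (Int × Int) × Int) coord =>
          if |coord.2 - s.2.2| ≤ tol then
            (s.1, s.2.1 ++ [coord], s.2.2)
          else
            (s.1 ++ [PySem.List.sorted s.2.1 (fun c => c.1) false], [coord], coord.2))
        (rows, cur, cy)).1
     else (t.foldl
        (fun (s : List (List (Int × Int)) × List (Int × Int) × Int) coord =>
          if |coord.2 - s.2.2| ≤ tol then
            (s.1, s.2.1 ++ [coord], s.2.2)
          else
            (s.1 ++ [PySem.List.sorted s.2.1 (fun c => c.1) false], [coord], coord.2))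
        (rows, cur, cy)).1 ++ [PySem.List.sorted (t.foldl
        (fun (s : List (List (Int × Int)) × List (Int × Int) × Int) coord =>
          if |coord.2 - s.2.2| ≤ tol then
            (s.1, s.2.1 ++ [coord], s.2.2)
          else
            (s.1 ++ [PySem.List.sorted s.2.1 (fun c => c.1) false], [coord], coord.2))
        (rows, cur, cy)).2.1 (fun c => c.1) false])
    = rows ++ (pvGroups tol t cur cy).map (fun g => PySem.List.sorted g (fun c => c.1) false) := by
  induction t with
  | nil =>
    intro rows cur cy hcur
    simp [pvGroups, hcur]
  | cons c t ih =>
    intro rows cur cy hcur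
    simp only [List.foldl_cons, pvGroups]
    by_cases h : |c.2 - cy| ≤ tol
    · simpa [h] using ih rows (cur ++ [c]) cy (by simp)
    · have := ih (rows ++ [PySem.List.sorted cur (fun c => c.1) false]) [c] c.2 (by simp)
      simp only [if_neg h] at this ⊢
      simp [this]

-- A's accumulated groups are the structural rows
theorem pvGroups_eq_rows (tol : Int) (t : List (Int × Int)) :
    ∀ (cur : List (Int × Int)) (cy : Int),
    pvGroups tol t cur cy
      = (cur ++ t.takeWhile (fun c => decide (|c.2 - cy| ≤ tol))) ::
          pvRows tol (t.dropWhile (fun c => decide (|c.2 - cy| ≤ tol))) := by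
  intro cur cy
  induction t generalizing cur cy with
  | nil => simp [pvGroups, pvRows]
  | cons c t ih =>
    by_cases h : |c.2 - cy| ≤ tol
    · have hT : List.takeWhile (fun c' => decide (|c'.2 - cy| ≤ tol)) (c :: t)
          = c :: List.takeWhile (fun c' => decide (|c'.2 - cy| ≤ tol)) t := by simp [h]
      have hD : List.dropWhile (fun c' => decide (|c'.2 - cy| ≤ tol)) (c :: t)
          = List.dropWhile (fun c' => decide (|c'.2 - cy| ≤ tol)) t := by simp [h]
      simp only [pvGroups, if_pos h, hT, hD, ih (cur ++ [c]) cy]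
      simp
    · have hT : List.takeWhile (fun c' => decide (|c'.2 - cy| ≤ tol)) (c :: t) = [] := by simp [h]
      have hD : List.dropWhile (fun c' => decide (|c'.2 - cy| ≤ tol)) (c :: t) = c :: t := by simp [h]
      simp only [pvGroups, if_neg h, hT, hD, List.append_nil]
      rw [ih [c] c.2, pvRows]
      simp

-- insertBy agrees under comparators that agree on the target list
theorem pvInsertBy_congr {b1 b2 : Int × Int → Int × Int → Bool} (x : Int × Int) :
    ∀ s : List (Int × Int), (∀ q ∈ s, b1 x q = b2 x q) →
      PySem.List.insertBy b1 x s = PySem.List.insertBy b2 x s := by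
  intro s
  induction s with
  | nil => intro _; rfl
  | cons q s ih =>
    intro hq
    simp only [PySem.List.insertBy]
    rw [hq q (by simp)]
    by_cases h : b2 x q
    · simp [h]
    · simp [h, ih (fun r hr => hq r (by simp [hr]))]

-- insertBy puts x in front when it goes before everything
theorem pvInsertBy_front {b : Int × Int → Int × Int → Bool} (x : Int × Int) :
    ∀ t : List (Int × Int), (∀ z ∈ t, b x z = true) →
      PySem.List.insertBy b x t = x :: t := by
  intro t ht
  cases t with
  | nil => rfl
  | cons z t => simp [PySem.List.insertBy, ht z (by simp)]

-- the lexicographic (x, y) sort IS sorting by the Lex key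
theorem pvSorted2_eq_sortedLex (l : List (Int × Int)) :
    PySem.List.sorted2 l (fun p => p.1) (fun p => p.2) false
      = PySem.List.sorted l (fun p => (toLex p : Lex (Int × Int))) false := by
  have hc : (fun a b : Int × Int => decide (a.1 < b.1) || (!decide (b.1 < a.1) && decide (a.2 < b.2)))
      = fun a b : Int × Int => decide ((toLex a : Lex (Int × Int)) < toLex b) := by
    funext a b
    rw [Bool.eq_iff_iff]
    simp only [Bool.or_eq_true, Bool.and_eq_true, Bool.not_eq_true', decide_eq_true_eq,
      decide_eq_false_iff_not, Prod.Lex.toLex_lt_toLex]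
    constructor
    · rintro (h | ⟨h1, h2⟩)
      · exact Or.inl h
      · rcases lt_trichotomy a.1 b.1 with h' | h' | h'
        · exact Or.inl h'
        · exact Or.inr ⟨h', h2⟩
        · exact absurd h' h1
    · rintro (h | ⟨h1, h2⟩)
      · exact Or.inl h
      · exact Or.inr ⟨by omega, h2⟩
  rw [PySem.List.sorted_eq_foldl_insertBy]
  show List.foldl (fun acc x => PySem.List.insertBy
      (fun a b : Int × Int => decide (a.1 < b.1) || (!decide (b.1 < a.1) && decide (a.2 < b.2))) x acc) [] l
    = _
  rw [hc]

-- one-step (rightmost-element) unfoldings of the three stable sorts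
theorem pvSortedY_append (l : List (Int × Int)) (p : Int × Int) :
    PySem.List.sorted (l ++ [p]) (fun c => c.2) false
      = PySem.List.insertBy pvLtY p (PySem.List.sorted l (fun c => c.2) false) := by
  rw [PySem.List.sorted_eq_foldl_insertBy, List.foldl_append, ← PySem.List.sorted_eq_foldl_insertBy]
  rfl

theorem pvSortedX_append (l : List (Int × Int)) (p : Int × Int) :
    PySem.List.sorted (l ++ [p]) (fun c => c.1) false
      = PySem.List.insertBy pvLtX p (PySem.List.sorted l (fun c => c.1) false) := by
  rw [PySem.List.sorted_eq_foldl_insertBy, List.foldl_append, ← PySem.List.sorted_eq_foldl_insertBy]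
  rfl

theorem pvSortedLex_append (l : List (Int × Int)) (p : Int × Int) :
    PySem.List.sorted (l ++ [p]) (fun q => (toLex q : Lex (Int × Int))) false
      = PySem.List.insertBy pvLtLex p
          (PySem.List.sorted l (fun q => (toLex q : Lex (Int × Int))) false) := by
  rw [PySem.List.sorted_eq_foldl_insertBy, List.foldl_append, ← PySem.List.sorted_eq_foldl_insertBy]
  rfl

-- stability: on a y-sorted list, the stable x-sort equals the Lex (x, y) sort
theorem pvSortedX_eq_sortedLex (l : List (Int × Int))
    (hl : l.Pairwise (fun a b => a.2 ≤ b.2)) :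
    PySem.List.sorted l (fun c => c.1) false
      = PySem.List.sorted l (fun p => (toLex p : Lex (Int × Int))) false := by
  induction l using List.reverseRecOn with
  | nil => rfl
  | append_singleton l p ih =>
    obtain ⟨hl', -, hq⟩ := List.pairwise_append.mp hl
    rw [pvSortedX_append, pvSortedLex_append, ih hl']
    apply pvInsertBy_congr
    intro q hqmem
    have hql : q ∈ l := (PySem.List.mem_sorted _ _ _ _).mp hqmem
    have hle : q.2 ≤ p.2 := hq q hql p (by simp)
    show decide (p.1 < q.1) = decide ((toLex p : Lex (Int × Int)) < toLex q)
    rw [decide_eq_decide, Prod.Lex.toLex_lt_toLex]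
    constructor
    · exact Or.inl
    · rintro (h | ⟨h1, h2⟩)
      · exact h
      · omega

-- filtering commutes with inserting a kept element into a y-sorted list
theorem pvFilter_insertY (Q : Int × Int → Bool) (p : Int × Int) :
    ∀ s : List (Int × Int), s.Pairwise (fun a b => a.2 ≤ b.2) → Q p = true →
      (PySem.List.insertBy pvLtY p s).filter Q = PySem.List.insertBy pvLtY p (s.filter Q) := by
  intro s
  induction s with
  | nil => intro _ hp; simp [PySem.List.insertBy, hp]
  | cons q s ih =>
    intro hpw hp
    obtain ⟨hq, hpw'⟩ := List.pairwise_cons.mp hpw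
    simp only [PySem.List.insertBy]
    by_cases h : pvLtY p q = true
    · rw [if_pos h]
      by_cases hQq : Q q = true
      · simp [hp, hQq, PySem.List.insertBy, h]
      · have hQq' : Q q = false := by simpa using hQq
        simp only [List.filter_cons, hp, hQq', if_pos, Bool.false_eq_true, if_false]
        rw [pvInsertBy_front p _ ?_]
        intro z hz
        have hzs : z ∈ s := List.mem_of_mem_filter hz
        have h1 : q.2 ≤ z.2 := hq z hzs
        have h2 : p.2 < q.2 := by simpa [pvLtY] using h
        simp only [pvLtY, decide_eq_true_eq]
        omega
    · rw [if_neg h]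
      by_cases hQq : Q q = true
      · simp only [List.filter_cons, hQq, if_true, ih hpw' hp, PySem.List.insertBy, if_neg h]
      · have hQq' : Q q = false := by simpa using hQq
        simp [hQq', ih hpw' hp]

theorem pvFilter_insertY_drop (Q : Int × Int → Bool) (p : Int × Int) :
    ∀ s : List (Int × Int), Q p = false →
      (PySem.List.insertBy pvLtY p s).filter Q = s.filter Q := by
  intro s hp
  induction s with
  | nil => simp [PySem.List.insertBy, hp]
  | cons q s ih =>
    simp only [PySem.List.insertBy]
    by_cases h : pvLtY p q = true
    · rw [if_pos h]; simp [hp]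
    · rw [if_neg h]
      by_cases hQq : Q q = true
      · simp [hQq, ih]
      · have hQq' : Q q = false := by simpa using hQq
        simp [hQq', ih]

-- the stable y-sort commutes with filtering
theorem pvSortedY_filter (Q : Int × Int → Bool) (l : List (Int × Int)) :
    PySem.List.sorted (l.filter Q) (fun c => c.2) false
      = (PySem.List.sorted l (fun c => c.2) false).filter Q := by
  induction l using List.reverseRecOn with
  | nil => rfl
  | append_singleton l p ih =>
    rw [List.filter_append, pvSortedY_append]
    by_cases hp : Q p = true
    · rw [show List.filter Q [p] = [p] from by simp [hp]]
      rw [pvSortedY_append, ih]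
      exact (pvFilter_insertY Q p _ (by simpa using PySem.List.sorted_pairwise l (fun c : Int × Int => c.2)) hp).symm
    · have hp' : Q p = false := by simpa using hp
      rw [show List.filter Q [p] = [] from by simp [hp'], List.append_nil, ih]
      exact (pvFilter_insertY_drop Q p _ hp').symm

-- on a y-sorted list, a y-monotone takeWhile/dropWhile is a filter
theorem pvTakeDrop_eq_filter (P : Int × Int → Bool) (t : List (Int × Int))
    (hpw : t.Pairwise (fun a b => a.2 ≤ b.2))
    (hmono : ∀ a ∈ t, ∀ b ∈ t, P a = false → a.2 ≤ b.2 → P b = false) :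
    t.takeWhile P = t.filter P ∧ t.dropWhile P = t.filter (fun c => !P c) := by
  induction t with
  | nil => simp
  | cons c t ih =>
    obtain ⟨hc, hpw'⟩ := List.pairwise_cons.mp hpw
    have ih' := ih hpw' (fun a ha b hb => hmono a (by simp [ha]) b (by simp [hb]))
    by_cases h : P c = true
    · simp [List.takeWhile_cons, List.dropWhile_cons, h, List.filter_cons, ih'.1, ih'.2]
    · have hfalse : P c = false := by simpa using h
      have hall : ∀ b ∈ t, P b = false :=
        fun b hb => hmono c (by simp) b (by simp [hb]) hfalse (hc b hb)
      have hnil : t.filter P = [] := List.filter_eq_nil_iff.mpr (fun b hb => by simp [hall b hb])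
      have hself : t.filter (fun c' => !P c') = t :=
        List.filter_eq_self.mpr (fun b hb => by simp [hall b hb])
      simp [List.takeWhile_cons, hfalse, hnil, hself]

-- inserting and erasing commute on a y-sorted list
theorem pvInsertY_erase (x p : Int × Int) :
    ∀ s : List (Int × Int), s.Pairwise (fun a b => a.2 ≤ b.2) → x ∈ s →
      (PySem.List.insertBy pvLtY p s).erase x = PySem.List.insertBy pvLtY p (s.erase x) := by
  intro s
  induction s with
  | nil => intro _ hx; simp at hx
  | cons q s ih =>
    intro hpw hx
    obtain ⟨hq, hpw'⟩ := List.pairwise_cons.mp hpw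
    simp only [PySem.List.insertBy]
    by_cases h : pvLtY p q = true
    · rw [if_pos h]
      have hp2 : p.2 < q.2 := by simpa [pvLtY] using h
      have hpx : p ≠ x := by
        intro he
        rcases List.mem_cons.mp hx with h1 | hxs
        · rw [he, h1] at hp2; omega
        · have := hq x hxs; rw [he] at hp2; omega
      rw [List.erase_cons, if_neg (by simpa using hpx)]
      rw [pvInsertBy_front p _ ?_]
      intro z hz
      have hzm : z ∈ q :: s := List.mem_of_mem_erase hz
      have hz2 : q.2 ≤ z.2 := by
        rcases List.mem_cons.mp hzm with rfl | hzs
        · exact le_refl _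
        · exact hq z hzs
      simp only [pvLtY, decide_eq_true_eq]
      omega
    · rw [if_neg h]
      by_cases hqx : q = x
      · subst hqx
        rw [List.erase_cons, if_pos (by simp), List.erase_cons, if_pos (by simp)]
      · rw [List.erase_cons, if_neg (by simpa using hqx), List.erase_cons,
          if_neg (by simpa using hqx)]
        have hxs : x ∈ s := by
          rcases List.mem_cons.mp hx with rfl | hxs
          · exact absurd rfl hqx
          · exact hxs
        simp only [PySem.List.insertBy, if_neg h]
        rw [ih hpw' hxs]

theorem pvInsertY_erase_self (x : Int × Int) :
    ∀ s : List (Int × Int), x ∉ s →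
      (PySem.List.insertBy pvLtY x s).erase x = s := by
  intro s hx
  induction s with
  | nil => simp [PySem.List.insertBy]
  | cons q s ih =>
    have hqx : q ≠ x := fun he => hx (by rw [← he]; simp)
    have hxs : x ∉ s := fun hm => hx (by simp [hm])
    simp only [PySem.List.insertBy]
    by_cases h : pvLtY x q = true
    · rw [if_pos h, List.erase_cons, if_pos (by simp)]
    · rw [if_neg h, List.erase_cons, if_neg (by simpa using hqx), ih hxs]

-- the stable y-sort commutes with erasing the first occurrence of a value
theorem pvSortedY_erase (l : List (Int × Int)) (x : Int × Int) :
    PySem.List.sorted (l.erase x) (fun c => c.2) false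
      = (PySem.List.sorted l (fun c => c.2) false).erase x := by
  induction l using List.reverseRecOn with
  | nil => rfl
  | append_singleton l p ih =>
    rw [List.erase_append, pvSortedY_append]
    by_cases hx : x ∈ l
    · rw [if_pos hx, pvSortedY_append, ih]
      exact (pvInsertY_erase x p _
        (by simpa using PySem.List.sorted_pairwise l (fun c : Int × Int => c.2))
        (by rw [PySem.List.mem_sorted]; exact hx)).symm
    · rw [if_neg hx]
      by_cases hpx : p = x
      · subst hpx
        rw [show ([p] : List (Int × Int)).erase p = [] from by simp, List.append_nil]
        exact (pvInsertY_erase_self p _ (by rw [PySem.List.mem_sorted]; exact hx)).symm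
      · rw [show ([p] : List (Int × Int)).erase x = [p] from by
            rw [List.erase_cons, if_neg (by simpa using hpx)]; rfl,
          pvSortedY_append]
        rw [List.erase_of_not_mem]
        intro hm
        rcases (PySem.List.mem_insertBy _ _ _ _).mp hm with rfl | hm'
        · exact hpx rfl
        · exact hx ((PySem.List.mem_sorted _ _ _ _).mp hm')

-- min with a key returns the head of the stable sort (the first minimum)
theorem pvMin?_head (l : List (Int × Int)) (h : Int × Int) (t : List (Int × Int))
    (hs : PySem.List.sorted l (fun c => c.2) false = h :: t) :
    PySem.List.min? l (fun p => p.2) = some h := by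
  induction l using List.reverseRecOn generalizing h t with
  | nil =>
    rw [show PySem.List.sorted ([] : List (Int × Int)) (fun c => c.2) false = [] from rfl] at hs
    cases hs
  | append_singleton l p ih =>
    rw [pvSortedY_append] at hs
    cases hl : PySem.List.sorted l (fun c => c.2) false with
    | nil =>
      have hl0 : l = [] := (PySem.List.sorted_eq_nil_iff _ _ _).mp hl
      subst hl0
      rw [hl] at hs
      simp only [PySem.List.insertBy] at hs
      injection hs with h1 _
      simp [PySem.List.min?, ← h1]
    | cons h' t' =>
      rw [hl] at hs
      have hm : PySem.List.min? l (fun q : Int × Int => q.2) = some h' := ih h' t' hl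
      have happ : PySem.List.min? (l ++ [p]) (fun q : Int × Int => q.2)
          = if p.2 < h'.2 then some p else some h' := by
        unfold PySem.List.min? at hm ⊢
        rw [List.foldl_append, hm]
        simp
      rw [happ]
      simp only [PySem.List.insertBy] at hs
      by_cases hlt : p.2 < h'.2
      · rw [if_pos (show pvLtY p h' = true by simpa [pvLtY] using hlt)] at hs
        injection hs with h1 _
        rw [if_pos hlt, h1]
      · rw [if_neg (show ¬ pvLtY p h' = true by simpa [pvLtY] using hlt)] at hs
        injection hs with h1 _
        rw [if_neg hlt, h1]

-- unfolding B's loop: the empty case and one full iteration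
theorem pvBLoop_nil (tol : Int) (res : List (Int × Int)) : pvBLoop tol [] res = res := by
  rw [pvBLoop]
  rfl

theorem pvBLoop_step (tol : Int) (l res : List (Int × Int)) (anchor : Int × Int)
    (rem' : List (Int × Int))
    (hmin : PySem.List.min? l (fun p => p.2) = some anchor)
    (hrem : PySem.List.remove? l anchor = some rem') :
    pvBLoop tol l res
      = pvBLoop tol (rem'.filter (fun p => decide (p.2 - anchor.2 > tol)))
          (res ++ PySem.List.sorted2
            (anchor :: rem'.filter (fun p => decide (p.2 - anchor.2 ≤ tol)))
            (fun p => p.1) (fun p => p.2) false) := by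
  rw [pvBLoop]
  split
  next heq => rw [hmin] at heq; cases heq
  next a heq =>
    rw [hmin] at heq
    cases heq
    split
    next heq2 => rw [hrem] at heq2; cases heq2
    next r heq2 => rw [hrem] at heq2; cases heq2; rfl

-- B's loop produces exactly the x-sorted rows of the y-sorted list
theorem pvBLoop_eq_rows (tol : Int) :
    ∀ (n : Nat) (l res : List (Int × Int)), l.length ≤ n →
      pvBLoop tol l res
        = res ++ ((pvRows tol (PySem.List.sorted l (fun c => c.2) false)).map
            (fun g => PySem.List.sorted g (fun c => c.1) false)).flatten := by
  intro n
  induction n with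
  | zero =>
    intro l res hlen
    have hl0 : l = [] := List.eq_nil_of_length_eq_zero (Nat.le_zero.mp hlen)
    subst hl0
    rw [pvBLoop_nil,
      show PySem.List.sorted ([] : List (Int × Int)) (fun c => c.2) false = [] from rfl]
    simp [pvRows]
  | succ n ih =>
    intro l res hlen
    cases hby : PySem.List.sorted l (fun c => c.2) false with
    | nil =>
      have hl0 : l = [] := (PySem.List.sorted_eq_nil_iff _ _ _).mp hby
      subst hl0
      rw [pvBLoop_nil]
      simp [pvRows]
    | cons h t =>
      -- structural facts about the y-sorted list
      have hmin : PySem.List.min? l (fun p => p.2) = some h := pvMin?_head l h t hby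
      have hmem : h ∈ l := PySem.List.min?_mem hmin
      have hrem : PySem.List.remove? l h = some (l.erase h) :=
        PySem.List.remove?_eq_some_erase l h hmem
      have hpwl : (h :: t).Pairwise (fun a b : Int × Int => a.2 ≤ b.2) := by
        have := PySem.List.sorted_pairwise l (fun c : Int × Int => c.2)
        rw [hby] at this
        simpa using this
      obtain ⟨hhd, hpwt⟩ := List.pairwise_cons.mp hpwl
      have hperm : (h :: t).Perm l := by
        have := PySem.List.sorted_perm l (fun c : Int × Int => c.2) false
        rwa [hby] at this
      have hpermt : t.Perm (l.erase h) := by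
        have := hperm.erase h
        rwa [List.erase_cons_head] at this
      -- the takeWhile/dropWhile of A's grouping are filters with the band predicates
      have hTD := pvTakeDrop_eq_filter (fun c => decide (|c.2 - h.2| ≤ tol)) t hpwt ?hmono
      case hmono =>
        intro a ha b hb hPa hab
        have h1 : h.2 ≤ a.2 := hhd a ha
        have h2 : h.2 ≤ b.2 := hhd b hb
        simp only [decide_eq_false_iff_not, not_le] at hPa ⊢
        rw [abs_of_nonneg (by omega)] at hPa ⊢
        omega
      have hle : t.filter (fun c => decide (|c.2 - h.2| ≤ tol))
          = t.filter (fun p => decide (p.2 - h.2 ≤ tol)) :=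
        List.filter_congr (fun c hc => by
          have := hhd c hc
          show decide (|c.2 - h.2| ≤ tol) = decide (c.2 - h.2 ≤ tol)
          rw [abs_of_nonneg (by omega)])
      have hgt : t.filter (fun c => !decide (|c.2 - h.2| ≤ tol))
          = t.filter (fun p => decide (p.2 - h.2 > tol)) :=
        List.filter_congr (fun c hc => by
          have := hhd c hc
          show (!decide (|c.2 - h.2| ≤ tol)) = decide (c.2 - h.2 > tol)
          rw [abs_of_nonneg (by omega), ← decide_not]
          exact decide_eq_decide.mpr (by omega))
      -- the y-sorted remainder after removing the anchor and the finished row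
      have hsel : PySem.List.sorted (l.erase h) (fun c => c.2) false = t := by
        rw [pvSortedY_erase, hby, List.erase_cons_head]
      have hrest : PySem.List.sorted
            ((l.erase h).filter (fun p => decide (p.2 - h.2 > tol))) (fun c => c.2) false
          = t.filter (fun p => decide (p.2 - h.2 > tol)) := by
        rw [pvSortedY_filter, hsel]
      -- the emitted row: one lexicographic sort = A's x-sort of the y-sorted row
      have hpwrow : (h :: t.filter (fun p => decide (p.2 - h.2 ≤ tol))).Pairwise
          (fun a b : Int × Int => a.2 ≤ b.2) :=
        hpwl.sublist (List.Sublist.cons₂ h (List.filter_sublist (p := fun p : Int × Int => decide (p.2 - h.2 ≤ tol))))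
      have hpermrow : (h :: (l.erase h).filter (fun p => decide (p.2 - h.2 ≤ tol))).Perm
          (h :: t.filter (fun p => decide (p.2 - h.2 ≤ tol))) :=
        ((hpermt.symm).filter _).cons h
      have hrow : PySem.List.sorted2
            (h :: (l.erase h).filter (fun p => decide (p.2 - h.2 ≤ tol)))
            (fun p => p.1) (fun p => p.2) false
          = PySem.List.sorted (h :: t.filter (fun p => decide (p.2 - h.2 ≤ tol)))
              (fun c => c.1) false := by
        rw [pvSorted2_eq_sortedLex,
          PySem.List.sorted_eq_sorted_of_perm _ _ (fun p : Int × Int => (toLex p : Lex (Int × Int)))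
            (fun a b hab => toLex.injective hab) hpermrow,
          pvSortedX_eq_sortedLex _ hpwrow]
      -- one step of B, then the induction hypothesis on the remainder
      have hlen' : ((l.erase h).filter (fun p => decide (p.2 - h.2 > tol))).length ≤ n := by
        have h1 := List.length_filter_le (fun p : Int × Int => decide (p.2 - h.2 > tol)) (l.erase h)
        have h2 : (l.erase h).length = l.length - 1 := List.length_erase_of_mem hmem
        have h3 : 0 < l.length := List.length_pos_of_mem hmem
        omega
      rw [pvBLoop_step tol l res h (l.erase h) hmin hrem, ih _ _ hlen', hrest, hrow]
      rw [show pvRows tol (h :: t)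
            = (h :: t.takeWhile (fun c => decide (|c.2 - h.2| ≤ tol))) ::
                pvRows tol (t.dropWhile (fun c => decide (|c.2 - h.2| ≤ tol))) from by rw [pvRows]]
      rw [hTD.1, hTD.2, hle, hgt]
      simp [List.append_assoc]

-- ===== VERDICT (by name: the statement is the Claim_ definition above) =====
theorem sort_coordinates_by_reading_order_spec : Claim_equal_sort_coordinates_by_reading_order := by
  intro coords tolerance _
  unfold Spec_sort_coordinates_by_reading_order
  unfold sort_coordinates_by_reading_order sort_coordinates_by_reading_order_alt
  rw [pvBLoop_eq_rows tolerance coords.length coords [] (le_refl _)]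
  by_cases hc : coords = []
  · subst hc
    rw [show PySem.List.sorted ([] : List (Int × Int)) (fun c => c.2) false = [] from rfl]
    simp [pvRows]
  · cases hby : PySem.List.sorted coords (fun c => c.2) false with
    | nil =>
      exact absurd ((PySem.List.sorted_eq_nil_iff _ _ _).mp hby) hc
    | cons h t =>
      simp only [if_neg hc]
      rw [pvA_loop tolerance t [] [h] h.2 (by simp)]
      rw [pvGroups_eq_rows tolerance t [h] h.2]
      rw [show pvRows tolerance (h :: t)
            = (h :: t.takeWhile (fun c => decide (|c.2 - h.2| ≤ tolerance))) ::
                pvRows tolerance (t.dropWhile (fun c => decide (|c.2 - h.2| ≤ tolerance))) from by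
        rw [pvRows]]
      simp
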